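-- pv_equiv track=rewrite | github.com/B-Gerb/advent2024Python | day21.py | numToDir
-- ===== SOURCE A (Python) =====
-- import heapq
--
-- valuesnum = {
--     "7": (0, 0), "8": (0, 1), "9": (0, 2),
--     "4": (1, 0), "5": (1, 1), "6": (1, 2),
--     "1": (2, 0), "2": (2, 1), "3": (2, 2),
--     "0": (3, 1), "A": (3, 2),
--     (0, 0): "7", (0, 1): "8", (0, 2): "9",
--     (1, 0): "4", (1, 1): "5", (1, 2): "6",
--     (2, 0): "1", (2, 1): "2", (2, 2): "3",
--     (3, 1): "0", (3, 2): "A"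
-- }
--
-- def numToDir(num):
--     full = [""]
--     cur = "A"
--     while num:
--         prev = cur
--         cur = num[0:1]
--         num = num[1:]
--         newR, newC = valuesnum[cur]
--         queue = []
--         heapq.heappush(queue, (0, "", valuesnum[prev], set()))
--         newFull = []
--         found = -1
--         while queue:
--             value = heapq.heappop(queue)
--             value[3].add(value[2])
--             if found != -1 and found < len(value[1]):
--                 break
--
--             if value[2] == (newR, newC):
--                 found = len(value[1])
--                 for x in full:
--                     newFull.append(x+value[1]+"A")
--                 continue
--             if (value[2][0] +1, value[2][1]) in valuesnum and (value[2][0] +1, value[2][1]) not in value[3]: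
--                 heapq.heappush(queue, (value[0]+1, value[1]+"v", (value[2][0] +1, value[2][1]), value[3].copy()))
--             if (value[2][0] -1, value[2][1]) in valuesnum and (value[2][0] -1, value[2][1]) not in value[3]:
--                 heapq.heappush(queue, (value[0]+1, value[1]+"^", (value[2][0] -1, value[2][1]), value[3].copy()))
--             if (value[2][0], value[2][1]+1) in valuesnum and (value[2][0], value[2][1]+1) not in value[3]:
--                 heapq.heappush(queue, (value[0]+1, value[1]+">", (value[2][0], value[2][1]+1), value[3].copy()))
--             if (value[2][0], value[2][1]-1) in valuesnum and (value[2][0], value[2][1]-1) not in value[3]: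
--                 heapq.heappush(queue, (value[0]+1, value[1]+"<", (value[2][0], value[2][1]-1), value[3].copy()))
--         full = newFull
--     return full
-- ===== SOURCE B (Python) =====
-- # B: for each consecutive key pair, recursively enumerate (in lexicographic
-- # order) the monotone move interleavings that stay on the keypad, instead of
-- # running a Dijkstra/heap search over simple paths.
--
-- _pos = {
--     "7": (0, 0), "8": (0, 1), "9": (0, 2),
--     "4": (1, 0), "5": (1, 1), "6": (1, 2),
--     "1": (2, 0), "2": (2, 1), "3": (2, 2),
--     "0": (3, 1), "A": (3, 2),
-- }
-- _cells = set(_pos.values())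
--
--
-- def _paths(dr, dc, r, c):
--     """All shortest move strings covering (dr, dc) from (r, c) staying on the
--     keypad, generated in lexicographic order ('<' < '>' < '^' < 'v')."""
--     if dr == 0 and dc == 0:
--         return [""]
--     out = []
--     for ch, sr, sc in (("<", 0, -1), (">", 0, 1), ("^", -1, 0), ("v", 1, 0)):
--         if (sc and sc * dc > 0) or (sr and sr * dr > 0):
--             nr, nc = r + sr, c + sc
--             if (nr, nc) in _cells:
--                 out.extend(ch + t for t in _paths(dr - sr, dc - sc, nr, nc))
--     return out
--
--
-- def numToDir(num):
--     full = [""]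
--     cur = "A"
--     for ch in num:
--         r0, c0 = _pos[cur]
--         r1, c1 = _pos[ch]
--         full = [x + p + "A" for p in _paths(r1 - r0, c1 - c0, r0, c0) for x in full]
--         cur = ch
--     return full
-- ===== Notes on version B (the rewrite author's own statement) =====
-- stated objective: simpler
-- what changed: A runs a heap-based (Dijkstra-style) search over simple keypad paths for every consecutive key pair; B instead directly enumerates, by a small recursion in lexicographic order, the monotone move interleavings that stay on the keypad, which are exactly the shortest paths.
import Mathlib
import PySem

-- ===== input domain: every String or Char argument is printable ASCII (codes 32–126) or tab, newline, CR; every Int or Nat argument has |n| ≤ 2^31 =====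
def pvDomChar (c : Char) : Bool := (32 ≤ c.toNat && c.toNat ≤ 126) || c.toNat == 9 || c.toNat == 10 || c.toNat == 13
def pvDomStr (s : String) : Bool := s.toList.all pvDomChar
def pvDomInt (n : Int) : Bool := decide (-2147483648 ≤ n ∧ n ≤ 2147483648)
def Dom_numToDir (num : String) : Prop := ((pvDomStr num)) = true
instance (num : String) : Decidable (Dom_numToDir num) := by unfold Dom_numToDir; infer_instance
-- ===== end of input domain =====

-- B replaces A's per-pair heap (Dijkstra-style) search over simple keypad paths by a
-- direct recursive enumeration, in lexicographic order, of the monotone move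
-- interleavings that stay on the keypad (objective: simpler).

-- ===== PORT A =====
-- the tuple-keyed half of the `valuesnum` dict (the only keys a tuple membership test can hit)
def pvKeyCells : List (Int × Int) :=
  [(0,0),(0,1),(0,2),(1,0),(1,1),(1,2),(2,0),(2,1),(2,2),(3,1),(3,2)]

-- `valuesnum[ch]` for a one-character string ch (none = KeyError)
def pvPosOf (c : Char) : Option (Int × Int) :=
  match c with
  | '7' => some (0,0) | '8' => some (0,1) | '9' => some (0,2)
  | '4' => some (1,0) | '5' => some (1,1) | '6' => some (1,2)
  | '1' => some (2,0) | '2' => some (2,1) | '3' => some (2,2)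
  | '0' => some (3,1) | 'A' => some (3,2)
  | _ => none

-- heap entry (cost, path, position, visited set); paths are ported through List Char,
-- as the PySem prelude prescribes for strings
abbrev PvEntry := Int × List Char × (Int × Int) × PySem.Set (Int × Int)

-- Python's `<` on strings, restricted to the entries' ASCII paths (exact there)
def pvLexLt : List Char → List Char → Bool
  | [], [] => false
  | [], _ :: _ => true
  | _ :: _, [] => false
  | a :: as, b :: bs =>
    if a.toNat < b.toNat then true
    else if b.toNat < a.toNat then false
    else pvLexLt as bs

-- the tuple comparison heapq uses on entries; the queue never holds two entries with
-- the same path (each pushed path extends its unique parent's path by a distinct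
-- char), so the (cost, path) prefix always decides and positions/sets never compare
def pvEntLt (a b : PvEntry) : Bool :=
  a.1 < b.1 || (a.1 == b.1 && pvLexLt a.2.1 b.2.1)

-- heapq modelled by a list kept sorted under pvEntLt: heappush = ordered insert,
-- heappop = head; exact for heapq's pop order because the queued keys are distinct
def pvHpush (e : PvEntry) : List PvEntry → List PvEntry
  | [] => [e]
  | h :: t => if pvEntLt e h then e :: h :: t else h :: pvHpush e t

-- one `if (cell) in valuesnum and (cell) not in value[3]: heappush(...)` step
def pvTryPush (q : List PvEntry) (cost : Int) (path : List Char)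
    (vis : PySem.Set (Int × Int)) (cell : Int × Int) (d : Char) : List PvEntry :=
  if pvKeyCells.contains cell && !(PySem.Set.contains vis cell) then
    pvHpush (cost + 1, path ++ [d], cell, vis) q
  else q

-- the inner `while queue:` loop; fuel 100 is a structural bound only: the loop pops
-- at most 56 entries before the queue empties or the break fires (established, per
-- key pair, by the `decide` proof of pvStep_eq below), so the fuel-0 arm is unreached
def pvBfs (fuel : Nat) (queue : List PvEntry) (tgt : Int × Int)
    (full newFull : List (List Char)) (found : Int) : List (List Char) :=
  match fuel with
  | 0 => newFull
  | f + 1 =>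
    match queue with
    | [] => newFull
    | (cost, path, pos, vis) :: rest =>
      let vis := PySem.Set.add vis pos          -- value[3].add(value[2])
      if found != -1 && decide (found < (path.length : Int)) then newFull   -- break
      else if pos == tgt then
        pvBfs f rest tgt full (newFull ++ full.map (fun x => x ++ path ++ ['A']))
          (path.length : Int)
      else
        let q1 := pvTryPush rest cost path vis (pos.1 + 1, pos.2) 'v'
        let q2 := pvTryPush q1 cost path vis (pos.1 - 1, pos.2) '^'
        let q3 := pvTryPush q2 cost path vis (pos.1, pos.2 + 1) '>'
        let q4 := pvTryPush q3 cost path vis (pos.1, pos.2 - 1) '<'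
        pvBfs f q4 tgt full newFull found

-- the outer `while num:` loop, consuming the characters of num
def pvGoA : List Char → List (List Char) → Char → List (List Char)
  | [], full, _ => full
  | c :: rest, full, prev =>
    match pvPosOf c, pvPosOf prev with
    | some tgt, some p0 =>
      pvGoA rest (pvBfs 100 [(0, [], p0, PySem.Set.empty)] tgt full [] (-1)) c
    | _, _ => []   -- KeyError on valuesnum[cur]; excluded by Pre_numToDir

def numToDir (num : String) : List String :=
  (pvGoA num.toList [[]] 'A').map (fun cs => String.ofList cs)

-- ===== PORT B =====
-- Source B's _paths: all shortest move lists covering (dr, dc) from (r, c) staying on the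
-- keypad, generated in lexicographic order; fuel = dr.natAbs + dc.natAbs is the exact
-- recursion depth of _paths (one move per level), a structural stand-in for its recursion
def pvGenB (fuel : Nat) (dr dc r c : Int) : List (List Char) :=
  match fuel with
  | 0 => [[]]
  | f + 1 =>
    if dr == 0 && dc == 0 then [[]]
    else
      (if dc < 0 && pvKeyCells.contains (r, c - 1) then
        (pvGenB f dr (dc + 1) r (c - 1)).map (fun t => '<' :: t) else []) ++
      (if dc > 0 && pvKeyCells.contains (r, c + 1) then
        (pvGenB f dr (dc - 1) r (c + 1)).map (fun t => '>' :: t) else []) ++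
      (if dr < 0 && pvKeyCells.contains (r - 1, c) then
        (pvGenB f (dr + 1) dc (r - 1) c).map (fun t => '^' :: t) else []) ++
      (if dr > 0 && pvKeyCells.contains (r + 1, c) then
        (pvGenB f (dr - 1) dc (r + 1) c).map (fun t => 'v' :: t) else [])

-- Source B's `for ch in num` loop
def pvGoB : List Char → List (List Char) → Char → List (List Char)
  | [], full, _ => full
  | c :: rest, full, prev =>
    match pvPosOf c, pvPosOf prev with
    | some t, some s =>
      let ps := pvGenB ((t.1 - s.1).natAbs + (t.2 - s.2).natAbs)
        (t.1 - s.1) (t.2 - s.2) s.1 s.2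
      pvGoB rest (ps.flatMap (fun p => full.map (fun x => x ++ p ++ ['A']))) c
    | _, _ => []   -- KeyError on _pos[ch]; excluded by Pre_numToDir

def numToDir_alt (num : String) : List String :=
  (pvGoB num.toList [[]] 'A').map (fun cs => String.ofList cs)

-- ===== PRECONDITION & SPEC =====
-- Pre_ excludes exactly the characters outside the keypad dict, on which A raises KeyError
def Pre_numToDir (num : String) : Prop :=
  (num.toList.all (fun c => ['0','1','2','3','4','5','6','7','8','9','A'].contains c)) = true
instance (num : String) : Decidable (Pre_numToDir num) := by unfold Pre_numToDir; infer_instance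

def pvWitness_numToDir : String := "029A"

def Spec_numToDir (num : String) (out : List String) : Prop := out = numToDir_alt num
instance (num : String) (out : List String) : Decidable (Spec_numToDir num out) := by
  unfold Spec_numToDir; infer_instance

-- ===== CLAIM (what is proved, stated in full; the proofs are below) =====
def Claim_equal_numToDir : Prop :=
  ∀ (num : String), Dom_numToDir num → Pre_numToDir num → Spec_numToDir num (numToDir num)

-- ===== LEMMAS AND PROOFS =====

-- proof-side: the same inner loop as pvBfs, collecting only the found shortest paths
def pvBfsPaths (fuel : Nat) (queue : List PvEntry) (tgt : Int × Int) (found : Int) :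
    List (List Char) :=
  match fuel with
  | 0 => []
  | f + 1 =>
    match queue with
    | [] => []
    | (cost, path, pos, vis) :: rest =>
      let vis := PySem.Set.add vis pos
      if found != -1 && decide (found < (path.length : Int)) then []
      else if pos == tgt then
        path :: pvBfsPaths f rest tgt (path.length : Int)
      else
        let q1 := pvTryPush rest cost path vis (pos.1 + 1, pos.2) 'v'
        let q2 := pvTryPush q1 cost path vis (pos.1 - 1, pos.2) '^'
        let q3 := pvTryPush q2 cost path vis (pos.1, pos.2 + 1) '>'
        let q4 := pvTryPush q3 cost path vis (pos.1, pos.2 - 1) '<'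
        pvBfsPaths f q4 tgt found

-- pvBfs = newFull ++ (the collected shortest paths crossed with full)
theorem pvBfs_eq_paths (fuel : Nat) :
    ∀ (queue : List PvEntry) (tgt : Int × Int) (full newFull : List (List Char)) (found : Int),
      pvBfs fuel queue tgt full newFull found
        = newFull ++ (pvBfsPaths fuel queue tgt found).flatMap
            (fun p => full.map (fun x => x ++ p ++ ['A'])) := by
  induction fuel with
  | zero => intro queue tgt full newFull found; simp [pvBfs, pvBfsPaths]
  | succ f ih =>
    intro queue tgt full newFull found
    match queue with
    | [] => simp [pvBfs, pvBfsPaths]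
    | (cost, path, pos, vis) :: rest =>
      simp only [pvBfs, pvBfsPaths]
      split_ifs with h1 h2
      · simp
      · rw [ih]; simp [List.append_assoc]
      · rw [ih]

-- the key-to-coordinates association, and the coordinates of a valid key
def pvKeyAssoc : List (Char × (Int × Int)) :=
  [('7',(0,0)), ('8',(0,1)), ('9',(0,2)),
   ('4',(1,0)), ('5',(1,1)), ('6',(1,2)),
   ('1',(2,0)), ('2',(2,1)), ('3',(2,2)),
   ('0',(3,1)), ('A',(3,2))]

def pvLook (c : Char) : Int × Int := (pvPosOf c).getD (0, 0)

theorem pvPosOf_mem (c : Char) (h : c ∈ ['0','1','2','3','4','5','6','7','8','9','A']) :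
    pvPosOf c = some (pvLook c) ∧ (c, pvLook c) ∈ pvKeyAssoc := by
  fin_cases h <;> exact ⟨rfl, by decide⟩

-- the heart: on every key pair, A's heap search finds exactly B's sorted monotone paths
set_option maxHeartbeats 40000000 in
theorem pvStep_eq :
    ∀ a ∈ pvKeyAssoc, ∀ b ∈ pvKeyAssoc,
      pvBfsPaths 100 [(0, [], a.2, PySem.Set.empty)] b.2 (-1)
        = pvGenB ((b.2.1 - a.2.1).natAbs + (b.2.2 - a.2.2).natAbs)
            (b.2.1 - a.2.1) (b.2.2 - a.2.2) a.2.1 a.2.2 := by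
  decide

theorem pvGo_eq (l : List Char) :
    ∀ (full : List (List Char)) (prev : Char),
      prev ∈ ['0','1','2','3','4','5','6','7','8','9','A'] →
      (∀ c ∈ l, c ∈ ['0','1','2','3','4','5','6','7','8','9','A']) →
      pvGoA l full prev = pvGoB l full prev := by
  induction l with
  | nil => intro full prev _ _; rfl
  | cons c rest ih =>
    intro full prev hprev hl
    have hc : c ∈ ['0','1','2','3','4','5','6','7','8','9','A'] := hl c (by simp)
    obtain ⟨hcs, hcm⟩ := pvPosOf_mem c hc
    obtain ⟨hps, hpm⟩ := pvPosOf_mem prev hprev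
    have hstep := pvStep_eq _ hpm _ hcm
    simp only [pvGoA, pvGoB, hcs, hps]
    rw [pvBfs_eq_paths, hstep]
    simp only [List.nil_append]
    exact ih _ c hc (fun x hx => hl x (by simp [hx]))

-- ===== VERDICT (by name: the statement is the Claim_ definition above) =====
theorem numToDir_spec : Claim_equal_numToDir := by
  intro num _ hpre
  unfold Pre_numToDir at hpre
  simp only [List.all_eq_true, List.contains_iff_mem] at hpre
  unfold Spec_numToDir numToDir numToDir_alt
  rw [pvGo_eq num.toList [[]] 'A' (by decide) hpre]
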